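-- pv_equiv track=rewrite | github.com/gggggeric/SIA2Project | machineLearning/app.py | diagnose_astigmatism
-- ===== SOURCE A (Python) =====
-- def diagnose_astigmatism(lines):
--     left_eye = any(line in ['4', '5', '7', '8'] for line in lines)
--     right_eye = any(line in ['1', '2', '10', '11'] for line in lines)
--     both_eyes = any(line in ['3', '6', '9', '12'] for line in lines)
--
--     if left_eye and right_eye:
--         return "Astigmatism detected in BOTH eyes."
--     elif left_eye:
--         return "Astigmatism detected in the LEFT eye."
--     elif right_eye:
--         return "Astigmatism detected in the RIGHT eye."
--     elif both_eyes:
--         return "Astigmatism symptoms appear in BOTH eyes."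
--     else:
--         return "No significant signs of astigmatism detected."
-- ===== SOURCE B (Python) =====
-- _CATEGORY = {
--     '4': 'left', '5': 'left', '7': 'left', '8': 'left',
--     '1': 'right', '2': 'right', '10': 'right', '11': 'right',
--     '3': 'both', '6': 'both', '9': 'both', '12': 'both',
-- }
--
-- def diagnose_astigmatism(lines):
--     seen = set()
--     for line in lines:
--         cat = _CATEGORY.get(line)
--         if cat is not None:
--             seen.add(cat)
--     if 'left' in seen and 'right' in seen:
--         return "Astigmatism detected in BOTH eyes."
--     elif 'left' in seen:
--         return "Astigmatism detected in the LEFT eye."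
--     elif 'right' in seen:
--         return "Astigmatism detected in the RIGHT eye."
--     elif 'both' in seen:
--         return "Astigmatism symptoms appear in BOTH eyes."
--     else:
--         return "No significant signs of astigmatism detected."
-- ===== Notes on version B (the rewrite author's own statement) =====
-- stated objective: idiomatic
-- what changed: Replaces three separate any-scans over the list with one table-driven pass: a category dict looked up once per element, accumulating the categories seen in a set, then the same priority cascade.
import Mathlib
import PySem

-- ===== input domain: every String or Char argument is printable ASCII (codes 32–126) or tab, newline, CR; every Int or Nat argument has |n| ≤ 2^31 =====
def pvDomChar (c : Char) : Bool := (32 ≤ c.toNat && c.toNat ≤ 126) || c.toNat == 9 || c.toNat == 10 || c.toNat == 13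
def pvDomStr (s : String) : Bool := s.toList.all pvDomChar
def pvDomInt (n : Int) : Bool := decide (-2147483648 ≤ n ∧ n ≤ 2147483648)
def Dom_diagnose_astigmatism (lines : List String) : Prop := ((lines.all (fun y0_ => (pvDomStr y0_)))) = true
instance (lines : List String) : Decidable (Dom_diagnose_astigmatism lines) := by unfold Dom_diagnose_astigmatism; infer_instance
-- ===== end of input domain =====

-- B replaces A's three any-scans with one table-driven pass (category dict + set of seen categories); same result.

-- ===== PORT A =====
def diagnose_astigmatism (lines : List String) : String :=
  let left_eye := lines.any (fun line => (["4", "5", "7", "8"] : List String).contains line)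
  let right_eye := lines.any (fun line => (["1", "2", "10", "11"] : List String).contains line)
  let both_eyes := lines.any (fun line => (["3", "6", "9", "12"] : List String).contains line)
  if left_eye && right_eye then "Astigmatism detected in BOTH eyes."
  else if left_eye then "Astigmatism detected in the LEFT eye."
  else if right_eye then "Astigmatism detected in the RIGHT eye."
  else if both_eyes then "Astigmatism symptoms appear in BOTH eyes."
  else "No significant signs of astigmatism detected."

-- ===== PORT B =====
def pvCategory : PySem.Dict String String :=
  PySem.Dict.mk [("4", "left"), ("5", "left"), ("7", "left"), ("8", "left"),
                 ("1", "right"), ("2", "right"), ("10", "right"), ("11", "right"),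
                 ("3", "both"), ("6", "both"), ("9", "both"), ("12", "both")]

def diagnose_astigmatism_alt (lines : List String) : String :=
  let seen : PySem.Set String :=
    lines.foldl (fun seen line =>
      match pvCategory.get? line with
      | some cat => seen.add cat
      | none => seen) PySem.Set.empty
  if seen.contains "left" && seen.contains "right" then "Astigmatism detected in BOTH eyes."
  else if seen.contains "left" then "Astigmatism detected in the LEFT eye."
  else if seen.contains "right" then "Astigmatism detected in the RIGHT eye."
  else if seen.contains "both" then "Astigmatism symptoms appear in BOTH eyes."
  else "No significant signs of astigmatism detected."

-- ===== PRECONDITION & SPEC =====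
def Spec_diagnose_astigmatism (lines : List String) (out : String) : Prop := out = diagnose_astigmatism_alt lines
instance (lines : List String) (out : String) : Decidable (Spec_diagnose_astigmatism lines out) := by unfold Spec_diagnose_astigmatism; infer_instance

-- ===== CLAIM (what is proved, stated in full; the proofs are below) =====
def Claim_equal_diagnose_astigmatism : Prop := ∀ (lines : List String), Dom_diagnose_astigmatism lines → Spec_diagnose_astigmatism lines (diagnose_astigmatism lines)

-- ===== LEMMAS AND PROOFS =====

theorem pv_contains_add (s : PySem.Set String) (c x : String) :
    (s.add c).contains x = (s.contains x || x == c) := by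
  simp only [PySem.Set.contains, PySem.Set.mem_add, List.contains_eq_mem]
  by_cases hx : x = c <;> simp [hx]

-- B's accumulated set contains a category iff it was already in 'seen' or some line maps to it.
theorem pv_seen_contains (lines : List String) (seen : PySem.Set String) (x : String) :
    (lines.foldl (fun seen line =>
      match pvCategory.get? line with
      | some cat => seen.add cat
      | none => seen) seen).contains x
    = (seen.contains x || lines.any (fun line => pvCategory.get? line == some x)) := by
  induction lines generalizing seen with
  | nil => simp
  | cons l ls ih =>
    simp only [List.foldl_cons, List.any_cons, ih]
    cases h : pvCategory.get? l with
    | none => simp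
    | some c =>
      simp only [pv_contains_add, Bool.or_assoc]
      congr 1
      by_cases hx : x = c
      · subst hx; simp
      · have e1 : (x == c) = false := by simp [hx]
        have e2 : (c == x) = false := by simp; exact fun e => hx e.symm
        rw [e1]; simp [e2]

-- lookup in the category table, characterised per category (case split on the 12 keys)
theorem pv_cat_left (l : String) :
    (pvCategory.get? l == some "left") = (["4", "5", "7", "8"] : List String).contains l := by
  by_cases h1 : l = "4";  · subst h1; decide
  by_cases h2 : l = "5";  · subst h2; decide
  by_cases h3 : l = "7";  · subst h3; decide
  by_cases h4 : l = "8";  · subst h4; decide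
  by_cases h5 : l = "1";  · subst h5; decide
  by_cases h6 : l = "2";  · subst h6; decide
  by_cases h7 : l = "10"; · subst h7; decide
  by_cases h8 : l = "11"; · subst h8; decide
  by_cases h9 : l = "3";  · subst h9; decide
  by_cases h10 : l = "6";  · subst h10; decide
  by_cases h11 : l = "9";  · subst h11; decide
  by_cases h12 : l = "12"; · subst h12; decide
  simp [pvCategory, PySem.Dict.get?,
    Ne.symm h1, Ne.symm h2, Ne.symm h3, Ne.symm h4, Ne.symm h5, Ne.symm h6,
    Ne.symm h7, Ne.symm h8, Ne.symm h9, Ne.symm h10, Ne.symm h11, Ne.symm h12,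
    h1, h2, h3, h4, h5, h6, h7, h8, h9, h10, h11, h12]

theorem pv_cat_right (l : String) :
    (pvCategory.get? l == some "right") = (["1", "2", "10", "11"] : List String).contains l := by
  by_cases h1 : l = "4";  · subst h1; decide
  by_cases h2 : l = "5";  · subst h2; decide
  by_cases h3 : l = "7";  · subst h3; decide
  by_cases h4 : l = "8";  · subst h4; decide
  by_cases h5 : l = "1";  · subst h5; decide
  by_cases h6 : l = "2";  · subst h6; decide
  by_cases h7 : l = "10"; · subst h7; decide
  by_cases h8 : l = "11"; · subst h8; decide
  by_cases h9 : l = "3";  · subst h9; decide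
  by_cases h10 : l = "6";  · subst h10; decide
  by_cases h11 : l = "9";  · subst h11; decide
  by_cases h12 : l = "12"; · subst h12; decide
  simp [pvCategory, PySem.Dict.get?,
    Ne.symm h1, Ne.symm h2, Ne.symm h3, Ne.symm h4, Ne.symm h5, Ne.symm h6,
    Ne.symm h7, Ne.symm h8, Ne.symm h9, Ne.symm h10, Ne.symm h11, Ne.symm h12,
    h1, h2, h3, h4, h5, h6, h7, h8, h9, h10, h11, h12]

theorem pv_cat_both (l : String) :
    (pvCategory.get? l == some "both") = (["3", "6", "9", "12"] : List String).contains l := by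
  by_cases h1 : l = "4";  · subst h1; decide
  by_cases h2 : l = "5";  · subst h2; decide
  by_cases h3 : l = "7";  · subst h3; decide
  by_cases h4 : l = "8";  · subst h4; decide
  by_cases h5 : l = "1";  · subst h5; decide
  by_cases h6 : l = "2";  · subst h6; decide
  by_cases h7 : l = "10"; · subst h7; decide
  by_cases h8 : l = "11"; · subst h8; decide
  by_cases h9 : l = "3";  · subst h9; decide
  by_cases h10 : l = "6";  · subst h10; decide
  by_cases h11 : l = "9";  · subst h11; decide
  by_cases h12 : l = "12"; · subst h12; decide
  simp [pvCategory, PySem.Dict.get?,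
    Ne.symm h1, Ne.symm h2, Ne.symm h3, Ne.symm h4, Ne.symm h5, Ne.symm h6,
    Ne.symm h7, Ne.symm h8, Ne.symm h9, Ne.symm h10, Ne.symm h11, Ne.symm h12,
    h1, h2, h3, h4, h5, h6, h7, h8, h9, h10, h11, h12]

-- ===== VERDICT (by name: the statement is the Claim_ definition above) =====
theorem diagnose_astigmatism_spec : Claim_equal_diagnose_astigmatism := by
  intro lines _
  unfold Spec_diagnose_astigmatism diagnose_astigmatism diagnose_astigmatism_alt
  simp only [pv_seen_contains, pv_cat_left, pv_cat_right, pv_cat_both]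
  rfl
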